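-- pv_equiv track=rewrite | github.com/Sauravroy34/amfoss-task | task_04/Ethereal_quest.py | check
-- ===== SOURCE A (Python) =====
-- def check(force):
--
--   sum_xi = 0
--   sum_yi = 0
--   sum_zi = 0
--
--   for xi, yi, zi in force:
--     sum_xi += xi
--     sum_yi += yi
--     sum_zi += zi
--
--   return sum_xi == 0 and sum_yi == 0 and sum_zi == 0
-- ===== SOURCE B (Python) =====
-- def check(force):
--   return (sum(xi for xi, yi, zi in force) == 0
--           and sum(yi for xi, yi, zi in force) == 0
--           and sum(zi for xi, yi, zi in force) == 0)
-- ===== Notes on version B (the rewrite author's own statement) =====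
-- stated objective: idiomatic
-- what changed: Replaces the single fused accumulating loop over a 3-tuple state with three independent sum() reductions, one per component.
import Mathlib
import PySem

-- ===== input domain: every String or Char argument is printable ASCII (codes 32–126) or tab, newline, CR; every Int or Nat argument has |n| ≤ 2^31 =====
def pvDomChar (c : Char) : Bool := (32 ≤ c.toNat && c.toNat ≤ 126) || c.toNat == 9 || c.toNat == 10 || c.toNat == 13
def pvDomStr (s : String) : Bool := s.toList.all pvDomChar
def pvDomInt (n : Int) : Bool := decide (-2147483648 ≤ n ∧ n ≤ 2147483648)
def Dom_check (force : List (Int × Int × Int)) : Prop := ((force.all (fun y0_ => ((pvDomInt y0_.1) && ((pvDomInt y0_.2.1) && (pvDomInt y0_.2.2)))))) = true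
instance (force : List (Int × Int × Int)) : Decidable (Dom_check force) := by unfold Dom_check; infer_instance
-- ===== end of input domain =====

-- B replaces A's single fused loop over (sum_xi, sum_yi, sum_zi) with three independent per-component sums (idiomatic decomposition; same O(n) cost).

-- ===== PORT A =====
-- literal port: one fold carrying the triple accumulator
def check (force : List (Int × Int × Int)) : Bool :=
  let s := force.foldl (fun (acc : Int × Int × Int) t =>
    (acc.1 + t.1, acc.2.1 + t.2.1, acc.2.2 + t.2.2)) (0, 0, 0)
  s.1 == 0 && s.2.1 == 0 && s.2.2 == 0

-- ===== PORT B =====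
-- three independent reductions, one per component
def check_alt (force : List (Int × Int × Int)) : Bool :=
  ((force.map (fun t => t.1)).sum == 0)
    && ((force.map (fun t => t.2.1)).sum == 0)
    && ((force.map (fun t => t.2.2)).sum == 0)

-- ===== PRECONDITION & SPEC =====
def Spec_check (force : List (Int × Int × Int)) (out : Bool) : Prop := out = check_alt force
instance (force : List (Int × Int × Int)) (out : Bool) : Decidable (Spec_check force out) := by unfold Spec_check; infer_instance

-- ===== CLAIM (what is proved, stated in full; the proofs are below) =====
def Claim_equal_check : Prop := ∀ (force : List (Int × Int × Int)), Dom_check force → Spec_check force (check force)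

-- ===== LEMMAS AND PROOFS =====
theorem check_fold_sum (force : List (Int × Int × Int)) (a b c : Int) :
    force.foldl (fun (acc : Int × Int × Int) t =>
      (acc.1 + t.1, acc.2.1 + t.2.1, acc.2.2 + t.2.2)) (a, b, c)
    = (a + (force.map (fun t => t.1)).sum,
       b + (force.map (fun t => t.2.1)).sum,
       c + (force.map (fun t => t.2.2)).sum) := by
  induction force generalizing a b c with
  | nil => simp
  | cons h t ih => simp [ih]; refine ⟨by ring, by ring, by ring⟩

-- ===== VERDICT (by name: the statement is the Claim_ definition above) =====
theorem check_spec : Claim_equal_check := by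
  intro force _
  unfold Spec_check check check_alt
  simp [check_fold_sum]
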